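-- pv_equiv track=rewrite | github.com/arifkhan1990/codechef-solutions | Contest/Starters 112/3 Logicians Walk into a Bar.py | solve
-- ===== SOURCE A (Python) =====
-- def solve(N, preferences):
--
--     responses = []
--     b = 0
--     for i in range(N-1):
--         if b or preferences[i] == '0':
--             responses.append("NO")
--             b = 1
--         else:
--             responses.append("IDK")
--     if b == 0 and preferences[-1] == '1':
--         responses.append("YES")
--     else:
--         responses.append("NO")
--     return responses
-- ===== SOURCE B (Python) =====
-- def solve(N, preferences):
--     def clear(m):
--         # nobody among the first m logicians answered '0'
--         return all(preferences[t] != '0' for t in range(m))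
--     responses = ["IDK" if clear(i + 1) else "NO" for i in range(N - 1)]
--     responses.append("YES" if clear(N - 1) and preferences[-1] == '1' else "NO")
--     return responses
-- ===== Notes on version B (the rewrite author's own statement) =====
-- stated objective: alternative
-- what changed: Replaced A's stateful single pass with a latching flag by a stateless comprehension that decides each position independently from its own prefix (all(...!='0') over range(i+1)), trading O(N) for O(N^2) in exchange for removing all loop-carried state.
import Mathlib
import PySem

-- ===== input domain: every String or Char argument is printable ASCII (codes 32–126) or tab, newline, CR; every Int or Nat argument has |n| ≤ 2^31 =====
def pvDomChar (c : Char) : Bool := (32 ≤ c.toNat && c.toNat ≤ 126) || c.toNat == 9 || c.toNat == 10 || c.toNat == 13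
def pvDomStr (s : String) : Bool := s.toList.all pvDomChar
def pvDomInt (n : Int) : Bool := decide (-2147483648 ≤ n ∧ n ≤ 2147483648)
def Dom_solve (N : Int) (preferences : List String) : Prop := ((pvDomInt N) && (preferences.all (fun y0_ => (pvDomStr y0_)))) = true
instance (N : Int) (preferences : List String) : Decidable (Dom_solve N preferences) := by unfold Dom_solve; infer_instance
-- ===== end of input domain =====

-- B replaces A's stateful latching-flag loop by a stateless per-position rule: each answer is computed
-- independently from its own prefix (alternative decomposition; return value only, no mutation).

-- ===== PORT A =====
-- literal port of A: fold over range(N-1) carrying (responses, b); pyGetD is exact under Pre_ (indices in range, list nonempty)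
def solve (N : Int) (preferences : List String) : List String :=
  let st := (PySem.List.pyRange 0 (N - 1) 1).foldl
    (fun (st : List String × Int) i =>
      if st.2 != 0 || (PySem.List.pyGetD preferences i "") == "0"
      then (st.1 ++ ["NO"], 1)
      else (st.1 ++ ["IDK"], st.2)) ([], 0)
  if st.2 == 0 && (PySem.List.pyGetD preferences (-1) "") == "1"
  then st.1 ++ ["YES"] else st.1 ++ ["NO"]

-- ===== PORT B =====
-- Source B's helper clear(m): all(preferences[t] != '0' for t in range(m))
def pvClear (preferences : List String) (m : Int) : Bool :=
  (PySem.List.pyRange 0 m 1).all (fun t => (PySem.List.pyGetD preferences t "") != "0")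

-- literal port of Source B: a comprehension over range(N-1) deciding each position from its own prefix, plus the final answer
def solve_alt (N : Int) (preferences : List String) : List String :=
  ((PySem.List.pyRange 0 (N - 1) 1).map
      (fun i => if pvClear preferences (i + 1) then "IDK" else "NO"))
    ++ [if pvClear preferences (N - 1) && (PySem.List.pyGetD preferences (-1) "") == "1"
        then "YES" else "NO"]

-- ===== PRECONDITION & SPEC =====
-- Pre_ excludes exactly the inputs where Python A (and B) raises IndexError: an empty list, or N-1 exceeding the list length while no "0" entry stops the scan early.
def Pre_solve (N : Int) (preferences : List String) : Prop :=
  preferences ≠ [] ∧ (N - 1 ≤ (preferences.length : Int) ∨ "0" ∈ preferences)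
instance (N : Int) (preferences : List String) : Decidable (Pre_solve N preferences) := by unfold Pre_solve; infer_instance

def pvWitness_solve : Int × List String := (3, ["1", "0", "1"])

def Spec_solve (N : Int) (preferences : List String) (out : List String) : Prop := out = solve_alt N preferences
instance (N : Int) (preferences : List String) (out : List String) : Decidable (Spec_solve N preferences out) := by unfold Spec_solve; infer_instance

-- ===== CLAIM (what is proved, stated in full; the proofs are below) =====
def Claim_equal_solve : Prop := ∀ (N : Int) (preferences : List String), Dom_solve N preferences → Pre_solve N preferences → Spec_solve N preferences (solve N preferences)

-- ===== LEMMAS AND PROOFS =====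

-- A's loop body, parametric in the test P i = (preferences[i] == '0')
def pvStep (P : Int → Bool) (st : List String × Int) (i : Int) : List String × Int :=
  if st.2 != 0 || P i then (st.1 ++ ["NO"], 1) else (st.1 ++ ["IDK"], st.2)

lemma pvClear_zero (preferences : List String) : pvClear preferences 0 = true := by
  simp [pvClear, PySem.List.pyRange_one_eq_nil le_rfl]

lemma pvClear_nonpos (preferences : List String) {m : Int} (hm : m ≤ 0) :
    pvClear preferences m = true := by
  simp [pvClear, PySem.List.pyRange_one_eq_nil hm]

lemma pvClear_succ (preferences : List String) (a : Int) (ha : 0 ≤ a) :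
    pvClear preferences (a + 1)
      = (pvClear preferences a && !((PySem.List.pyGetD preferences a "") == "0")) := by
  unfold pvClear
  rw [PySem.List.pyRange_one_succ_right ha]
  simp [bne]

-- one step of A's loop, expressed through B's prefix predicate
lemma pvStep_eq (preferences : List String) (a : Int) (ha : 0 ≤ a) (res : List String) :
    pvStep (fun i => (PySem.List.pyGetD preferences i "") == "0")
        (res, if pvClear preferences a then 0 else 1) a
      = (res ++ [if pvClear preferences (a + 1) then "IDK" else "NO"],
         if pvClear preferences (a + 1) then 0 else 1) := by
  rw [pvClear_succ preferences a ha]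
  unfold pvStep
  by_cases hc : pvClear preferences a <;>
    by_cases hP : (PySem.List.pyGetD preferences a "") == "0" <;>
      simp [hc, hP]

-- invariant of A's loop: after range(a,b), the flag is 0 iff no '0' occurred in the first b positions,
-- and the appended answers are exactly B's per-position values
lemma pvLoop (preferences : List String) : ∀ (a b : Int), 0 ≤ a → a ≤ b → ∀ res : List String,
    (PySem.List.pyRange a b 1).foldl
        (pvStep (fun i => (PySem.List.pyGetD preferences i "") == "0"))
        (res, if pvClear preferences a then 0 else 1)
      = (res ++ (PySem.List.pyRange a b 1).map
            (fun i => if pvClear preferences (i + 1) then "IDK" else "NO"),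
         if pvClear preferences b then 0 else 1) := by
  intro a b ha hab
  by_cases hba : b ≤ a
  · have : a = b := le_antisymm hab hba
    subst this
    intro res
    rw [PySem.List.pyRange_one_eq_nil le_rfl]
    simp
  · replace hba := lt_of_not_ge hba
    have hlt : (b - (a + 1)).toNat < (b - a).toNat := by omega
    intro res
    rw [PySem.List.pyRange_one_cons hba]
    simp only [List.foldl_cons, List.map_cons]
    rw [pvStep_eq preferences a ha res]
    rw [pvLoop preferences (a + 1) b (by omega) (by omega)]
    simp [List.append_assoc]
termination_by a b => (b - a).toNat

lemma pvEq (N : Int) (preferences : List String) : solve N preferences = solve_alt N preferences := by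
  unfold solve solve_alt
  rw [show (fun (st : List String × Int) i =>
      if st.2 != 0 || (PySem.List.pyGetD preferences i "") == "0"
      then (st.1 ++ ["NO"], (1 : Int))
      else (st.1 ++ ["IDK"], st.2)) = pvStep (fun i => (PySem.List.pyGetD preferences i "") == "0") from rfl]
  by_cases hN : N - 1 ≤ 0
  · rw [PySem.List.pyRange_one_eq_nil hN]
    simp [pvClear_nonpos preferences hN]
    split <;> simp
  · rw [show (([] : List String), (0 : Int))
        = (([] : List String), (if pvClear preferences 0 then (0 : Int) else 1)) by
      simp [pvClear_zero]]
    rw [pvLoop preferences 0 (N - 1) le_rfl (by omega)]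
    by_cases hc : pvClear preferences (N - 1) <;> simp [hc] <;> split <;> simp

-- ===== VERDICT (by name: the statement is the Claim_ definition above) =====
theorem solve_spec : Claim_equal_solve := by
  intro N preferences _ _
  unfold Spec_solve
  exact pvEq N preferences
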